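-- pv_equiv track=rewrite | github.com/quantum5/cowsay | cowsay.py | make_ballon
-- ===== SOURCE A (Python) =====
-- from itertools import islice
--
-- def make_ballon(lines, think=False):
--     maxlen = max(map(len, lines)) + 2
--     format = '%s %-' + str(maxlen - 2) + 's %s'
--     yield ' %s ' % ('_' * maxlen)
--     if think:
--         for line in lines:
--             yield format % ('(', line, ')')
--     elif len(lines) < 2:
--         yield format % ('<', lines[0] if lines else '', '>')
--     else:
--         yield format % ('/', lines[0], '\\')
--         for line in islice(lines, 1, len(lines) - 1):
--             yield format % ('|', line, '|')
--         yield format % ('\\', lines[-1], '/')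
--     yield ' %s ' % ('-' * maxlen)
-- ===== SOURCE B (Python) =====
-- def make_ballon(lines, think=False):
--     maxlen = max(map(len, lines)) + 2
--     if think:
--         borders = [('(', ')')] * len(lines)
--     elif len(lines) == 1:
--         borders = [('<', '>')]
--     else:
--         borders = [('/', '\\')] + [('|', '|')] * (len(lines) - 2) + [('\\', '/')]
--     fmt = '%s %-' + str(maxlen - 2) + 's %s'
--     yield ' %s ' % ('_' * maxlen)
--     for (left, right), line in zip(borders, lines):
--         yield fmt % (left, line, right)
--     yield ' %s ' % ('-' * maxlen)
-- ===== Notes on version B (the rewrite author's own statement) =====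
-- stated objective: alternative
-- what changed: B first builds an explicit per-line table of (left,right) border characters and then formats all lines in one uniform zip loop, replacing A's three-branch control flow with islice and special-cased first/last yields.
-- outside the precondition, e.g. on make_ballon([], False): A raises ValueError, B raises ValueError
import Mathlib
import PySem

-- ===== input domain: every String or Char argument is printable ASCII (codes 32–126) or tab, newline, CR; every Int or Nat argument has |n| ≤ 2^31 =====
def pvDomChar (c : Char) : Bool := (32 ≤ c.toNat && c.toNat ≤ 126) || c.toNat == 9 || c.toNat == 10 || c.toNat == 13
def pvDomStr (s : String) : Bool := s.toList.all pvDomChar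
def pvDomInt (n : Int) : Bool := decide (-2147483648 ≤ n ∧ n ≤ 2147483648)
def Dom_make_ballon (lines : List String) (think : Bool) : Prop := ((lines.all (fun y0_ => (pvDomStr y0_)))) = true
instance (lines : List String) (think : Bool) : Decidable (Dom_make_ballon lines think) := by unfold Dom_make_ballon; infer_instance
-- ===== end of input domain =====

-- B replaces A's three-branch balloon body (islice + special-cased first/last lines) with an
-- explicit per-line border table consumed by one uniform zip loop; alternative decomposition, same cost.


-- shared by both ports (both Pythons compute maxlen and the '%s %-Ns %s' format the same way)
-- '%-Ns' left-justifies to width N with spaces (exact for these ASCII strings)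
def pvLJust (s : String) (n : Nat) : String :=
  s ++ String.ofList (List.replicate (n - (PySem.Str.len s).toNat) ' ')

def pvFmt (n : Nat) (l s r : String) : String := l ++ " " ++ pvLJust s n ++ " " ++ r

-- max(map(len, lines)) ; value of Python's max on a nonempty list of Nats
def pvMaxLen (lines : List String) : Nat :=
  (lines.map (fun s => (PySem.Str.len s).toNat)).foldl Nat.max 0

-- ===== PORT A =====
def make_ballon (lines : List String) (think : Bool) : List String :=
  let maxlen := pvMaxLen lines + 2
  let n := maxlen - 2
  let middle :=
    if think then
      lines.map (fun line => pvFmt n "(" line ")")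
    else if lines.length < 2 then
      [pvFmt n "<" ((PySem.List.pyGet? lines 0).getD "") ">"]   -- lines[0] if lines else ''
    else
      pvFmt n "/" ((PySem.List.pyGet? lines 0).getD "") "\\" ::
      ((lines.drop 1).take (lines.length - 2)).map (fun line => pvFmt n "|" line "|") ++   -- islice(lines, 1, len-1)
      [pvFmt n "\\" ((PySem.List.pyGet? lines (-1)).getD "") "/"]
  (" " ++ String.ofList (List.replicate maxlen '_') ++ " ") :: middle ++
  [" " ++ String.ofList (List.replicate maxlen '-') ++ " "]

-- ===== PORT B =====
def make_ballon_alt (lines : List String) (think : Bool) : List String :=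
  let maxlen := pvMaxLen lines + 2
  let n := maxlen - 2
  let borders : List (String × String) :=
    if think then List.replicate lines.length ("(", ")")
    else if lines.length = 1 then [("<", ">")]
    else ("/", "\\") :: List.replicate (lines.length - 2) ("|", "|") ++ [("\\", "/")]
  (" " ++ String.ofList (List.replicate maxlen '_') ++ " ") ::
  (borders.zip lines).map (fun p => pvFmt n p.1.1 p.2 p.1.2) ++
  [" " ++ String.ofList (List.replicate maxlen '-') ++ " "]

-- ===== PRECONDITION & SPEC =====
-- Python's max() raises ValueError on an empty sequence: A (and B) raise on lines = []
def Pre_make_ballon (lines : List String) (think : Bool) : Prop := lines ≠ []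
instance (lines : List String) (think : Bool) : Decidable (Pre_make_ballon lines think) := by unfold Pre_make_ballon; infer_instance
def pvWitness_make_ballon : List String × Bool := (["hi", "there"], false)

def Spec_make_ballon (lines : List String) (think : Bool) (out : List String) : Prop := out = make_ballon_alt lines think
instance (lines : List String) (think : Bool) (out : List String) : Decidable (Spec_make_ballon lines think out) := by unfold Spec_make_ballon; infer_instance

-- ===== CLAIM (what is proved, stated in full; the proofs are below) =====
def Claim_equal_make_ballon : Prop := ∀ (lines : List String) (think : Bool), Dom_make_ballon lines think → Pre_make_ballon lines think → Spec_make_ballon lines think (make_ballon lines think)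

-- ===== LEMMAS AND PROOFS =====

-- ===== LEMMAS (below the claim block) =====

-- (replicate len c).zip xs pairs every element with the same border (the 'think' / interior rows)
theorem pvZipReplicate {α β : Type} (xs : List β) (c : α) :
    (List.replicate xs.length c).zip xs = xs.map (fun x => (c, x)) := by
  induction xs with
  | nil => rfl
  | cons a t ih => simp [List.replicate_succ, ih]

-- tail of B's zip loop on the multi-line branch = A's interior rows ++ its last row
theorem pvZipTail (n : Nat) :
    ∀ (t : List String) (h : t ≠ []),
      ((List.replicate (t.length - 1) (("|" : String), ("|" : String)) ++ [("\\", "/")]).zip t).map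
          (fun p => pvFmt n p.1.1 p.2 p.1.2)
        = (t.take (t.length - 1)).map (fun line => pvFmt n "|" line "|") ++
          [pvFmt n "\\" (t.getLast h) "/"] := by
  intro t
  induction t with
  | nil => intro h; exact absurd rfl h
  | cons x u ih =>
    intro h
    cases u with
    | nil => rfl
    | cons y v =>
      have hne : (y :: v) ≠ [] := by simp
      have := ih hne
      simp only [List.length_cons, Nat.add_sub_cancel, List.replicate_succ, List.cons_append,
        List.zip_cons_cons, List.map_cons, List.take_succ_cons, List.getLast_cons hne] at *
      rw [this]

-- ===== VERDICT (by name: the statement is the Claim_ definition above) =====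
theorem make_ballon_spec : Claim_equal_make_ballon := by
  intro lines think _ hpre
  unfold Spec_make_ballon make_ballon make_ballon_alt
  cases lines with
  | nil => exact absurd rfl hpre
  | cons a t =>
    cases think with
    | true =>
      simp only [if_true]
      rw [pvZipReplicate, List.map_map]
      rfl
    | false =>
      cases t with
      | nil => rfl
      | cons b u =>
        have hne : (b :: u) ≠ [] := by simp
        simp only [List.length_cons]
        have h2 : ¬ (u.length + 1 + 1 < 2) := by omega
        have h1 : ¬ (u.length + 1 + 1 = 1) := by omega
        rw [if_neg h2, if_neg h1]
        simp only [Bool.false_eq_true, if_false, List.cons_append, List.zip_cons_cons,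
          List.map_cons, List.cons.injEq]
        constructor
        · simp
        · have := pvZipTail ((pvMaxLen (a :: b :: u) + 2) - 2) (b :: u) hne
          simp only [List.length_cons] at this ⊢
          rw [show u.length + 1 + 1 - 2 = u.length + 1 - 1 from by omega]
          rw [this]
          simp [PySem.List.pyGet?_neg_one, List.getLast?_eq_some_getLast, List.drop]
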